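-- pv_equiv track=rewrite | github.com/stasptkk-cpu/free_knots | functions.py | filter_results_with_chords
-- ===== SOURCE A (Python) =====
-- def _compute_canonical_form(diagram):
--     """
--     Вычисляет каноническую форму диаграммы для сравнения.
--
--     Возвращает отсортированный список списков индексов для каждой хорды,
--     что инвариантно относительно перенумерации, сдвига и отражения.
--     """
--     chord_indices = []
--     for chord_label in set(diagram):
--         indices = get_indices(diagram, chord_label)
--         chord_indices.append(sorted(indices))
--
--     return sorted(chord_indices)
--
-- def get_indices(diagram, chord_label):
--     """
--     Находит все позиции (индексы) заданной хорды в диаграмме.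
--
--     Каждая хорда в диаграмме свободного узла представлена двумя концами,
--     поэтому для корректной хорды функция всегда возвращает список из двух индексов.
--
--     Параметры:
--     ----------
--     diagram : list of int
--         Хордовая диаграмма, представленная списком меток хорд
--     chord_label : int
--         Метка хорды, для которой ищутся позиции
--
--     Возвращает:
--     -----------
--     list of int
--         Список индексов в диаграмме, где встречается заданная хорда.
--         Для корректной диаграммы всегда содержит ровно два элемента.
--
--     Примеры:
--     --------
--     >>> get_indices([1, 2, 1, 3, 2, 3], 1)
--     [0, 2]
--     >>> get_indices([1, 2, 1, 3, 2, 3], 2)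
--     [1, 4]
--     """
--     return [index for index, chord in enumerate(diagram) if chord == chord_label]
--
-- def filter_results_with_chords(results_with_chords):
--     """
--     Фильтрует результаты с сохранением хорд, оставляя только уникальные диаграммы.
--
--     Параметры:
--     ----------
--     results_with_chords : list of tuple
--         Список кортежей (диаграмма, хорды)
--
--     Возвращает:
--     -----------
--     list of tuple
--         Список уникальных результатов
--     """
--     if not results_with_chords:
--         return []
--
--     unique_results = []
--     seen_canonical = set()
--
--     for diagram, chords in results_with_chords:
--         canonical = _compute_canonical_form(diagram)
--         canonical_key = tuple(tuple(indices) for indices in canonical)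
--
--         if canonical_key not in seen_canonical:
--             seen_canonical.add(canonical_key)
--             unique_results.append((diagram, chords))
--
--     return unique_results
-- ===== SOURCE B (Python) =====
-- def filter_results_with_chords(results_with_chords):
--     """Deduplicate by relabeling chord labels in first-seen order (single pass, no sorting)."""
--     unique_results = []
--     seen_keys = set()
--     for diagram, chords in results_with_chords:
--         codes = {}
--         key = []
--         for lab in diagram:
--             if lab not in codes:
--                 codes[lab] = len(codes)
--             key.append(codes[lab])
--         key = tuple(key)
--         if key not in seen_keys:
--             seen_keys.add(key)
--             unique_results.append((diagram, chords))
--     return unique_results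
-- ===== Notes on version B (the rewrite author's own statement) =====
-- stated objective: faster
-- what changed: Replaces the canonicalization by grouping indices per label (a full rescan of the diagram for every distinct label, then sorting the index lists) with a single forward pass that relabels chord labels 0,1,2,... in first-seen order and uses that tuple as the dedup key; the two keys collide on exactly the same diagrams (both encode the position partition), so the kept results are identical.
import Mathlib
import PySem

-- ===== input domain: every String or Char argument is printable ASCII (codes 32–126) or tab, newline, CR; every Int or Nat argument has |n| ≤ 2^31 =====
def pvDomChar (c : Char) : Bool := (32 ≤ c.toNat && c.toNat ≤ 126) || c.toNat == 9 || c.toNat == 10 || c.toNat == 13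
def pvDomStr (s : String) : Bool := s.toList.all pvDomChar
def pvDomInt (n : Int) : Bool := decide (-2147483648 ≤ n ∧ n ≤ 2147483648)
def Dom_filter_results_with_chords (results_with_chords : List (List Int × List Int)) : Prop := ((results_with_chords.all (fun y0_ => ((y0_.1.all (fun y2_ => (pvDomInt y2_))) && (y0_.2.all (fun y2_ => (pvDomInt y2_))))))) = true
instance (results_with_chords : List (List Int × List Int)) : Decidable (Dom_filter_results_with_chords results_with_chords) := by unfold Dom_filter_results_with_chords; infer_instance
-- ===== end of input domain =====

-- B replaces the per-label index-grouping + sorting canonical form with a single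
-- forward pass relabeling labels 0,1,2,… in first-seen order; the keys collide on
-- exactly the same diagrams, so the kept results are identical (objective: faster).


-- ===== PORT A =====
-- get_indices: [index for index, chord in enumerate(diagram) if chord == chord_label]
def get_indices (diagram : List Int) (chord_label : Int) : List Int :=
  ((PySem.List.enumerate diagram 0).filter (fun p => p.2 == chord_label)).map (fun p => p.1)

-- _compute_canonical_form: loop over set(diagram) appending sorted(get_indices(...)), then sorted(...).
-- Python's set iteration order is hash order; the final sorted(...) makes the result order-independent
-- (the index lists of distinct labels are disjoint and nonempty, hence pairwise distinct), so iterating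
-- PySem.Set.ofList diagram (first-insertion order) is exact here.
def compute_canonical_form (diagram : List Int) : List (List Int) :=
  PySem.List.sorted
    ((PySem.Set.ofList diagram).foldl
      (fun chord_indices chord_label =>
        chord_indices ++ [PySem.List.sorted (get_indices diagram chord_label) (fun x => x)])
      [])
    (fun x => x)

def filter_results_with_chords (results_with_chords : List (List Int × List Int)) : List (List Int × List Int) :=
  if results_with_chords = [] then []
  else
    (results_with_chords.foldl
      (fun (st : List (List Int × List Int) × PySem.Set (List (List Int))) r =>
        let canonical := compute_canonical_form r.1
        if PySem.Set.contains st.2 canonical then st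
        else (st.1 ++ [(r.1, r.2)], PySem.Set.add st.2 canonical))
      ([], PySem.Set.empty)).1

-- ===== PORT B =====
-- inner loop of Source B: codes = {}; for lab in diagram: if lab not in codes: codes[lab] = len(codes); key.append(codes[lab])
def relabel_key (diagram : List Int) : List Int :=
  (diagram.foldl
    (fun (st : PySem.Dict Int Int × List Int) lab =>
      let codes := if st.1.contains lab then st.1 else st.1.insert lab ((st.1.size : Int))
      (codes, st.2 ++ [codes.getD lab 0]))
    (PySem.Dict.empty, [])).2

def filter_results_with_chords_alt (results_with_chords : List (List Int × List Int)) : List (List Int × List Int) :=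
  (results_with_chords.foldl
    (fun (st : List (List Int × List Int) × PySem.Set (List Int)) r =>
      let key := relabel_key r.1
      if PySem.Set.contains st.2 key then st
      else (st.1 ++ [(r.1, r.2)], PySem.Set.add st.2 key))
    ([], PySem.Set.empty)).1

-- ===== PRECONDITION & SPEC =====
def Spec_filter_results_with_chords (results_with_chords : List (List Int × List Int)) (out : List (List Int × List Int)) : Prop := out = filter_results_with_chords_alt results_with_chords
instance (results_with_chords : List (List Int × List Int)) (out : List (List Int × List Int)) : Decidable (Spec_filter_results_with_chords results_with_chords out) := by unfold Spec_filter_results_with_chords; infer_instance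

-- ===== CLAIM (what is proved, stated in full; the proofs are below) =====
def Claim_equal_filter_results_with_chords : Prop := ∀ (results_with_chords : List (List Int × List Int)), Dom_filter_results_with_chords results_with_chords → Spec_filter_results_with_chords results_with_chords (filter_results_with_chords results_with_chords)

-- ===== LEMMAS AND PROOFS =====

theorem pv_findIdx_congr {α : Type} {p q : α → Bool} (l : List α)
    (h : ∀ x ∈ l, p x = q x) : l.findIdx p = l.findIdx q := by
  induction l with
  | nil => rfl
  | cons x xs ih =>
    simp only [List.findIdx_cons, h x (List.mem_cons_self)]
    rw [ih (fun y hy => h y (List.mem_cons_of_mem _ hy))]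

theorem pv_mem_gi (d : List Int) (lab : Int) (i : Int) :
    i ∈ get_indices d lab ↔ ∃ (k : Nat), ∃ (h : k < d.length), i = (k : Int) ∧ d[k] = lab := by
  simp only [get_indices, List.mem_map, List.mem_filter, PySem.List.mem_enumerate_iff]
  constructor
  · rintro ⟨⟨j, v⟩, ⟨⟨k, hk, hp⟩, hv⟩, rfl⟩
    cases hp
    refine ⟨k, hk, by simp, by simpa using hv⟩
  · rintro ⟨k, hk, rfl, hd⟩
    exact ⟨((k : Int), d[k]), ⟨⟨k, hk, by simp⟩, by simpa using hd⟩, rfl⟩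

theorem pv_gi_pairwise (d : List Int) (lab : Int) :
    (get_indices d lab).Pairwise (· < ·) := by
  unfold get_indices
  apply List.Pairwise.map
  · exact fun p q h => h
  · exact (PySem.List.pairwise_lt_enumerate d 0).filter _

theorem pv_gi_len (d : List Int) (lab : Int) :
    (get_indices d lab).length = d.count lab := by
  simp only [get_indices, List.length_map, ← List.countP_eq_length_filter]
  rw [List.count_eq_countP]
  have : d = (PySem.List.enumerate d 0).map (fun p => p.2) := (PySem.List.map_snd_enumerate d 0).symm
  conv_rhs => rw [this]
  rw [List.countP_map]
  apply List.countP_congr; intro p _; rfl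

theorem pv_find_enum (d : List Int) (lab : Int) (h : lab ∈ d) : ∀ (s : Int),
    (PySem.List.enumerate d s).find? (fun p => p.2 == lab) = some ((s + (d.idxOf lab : Nat)), lab) := by
  induction d with
  | nil => cases h
  | cons x xs ih =>
    intro s
    rw [PySem.List.enumerate_cons, List.find?_cons]
    by_cases hx : x = lab
    · subst hx
      simp [List.idxOf_cons_self]
    · have hlab : lab ∈ xs := by
        rcases List.mem_cons.mp h with h' | h'
        · exact absurd h'.symm hx
        · exact h'
      simp only [show (((s : Int), x).2 == lab) = false by simpa using hx]
      rw [ih hlab (s + 1), List.idxOf_cons_ne _ hx]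
      congr 2
      simp only [Nat.succ_eq_add_one]
      push_cast
      ring

theorem pv_gi_head (d : List Int) (lab : Int) (h : lab ∈ d) :
    (get_indices d lab).head? = some ((d.idxOf lab : Nat) : Int) := by
  unfold get_indices
  rw [List.head?_map, List.head?_filter, pv_find_enum d lab h 0]
  simp

theorem pv_ofList_pairwise (d : List Int) :
    (PySem.Set.ofList d).Pairwise (fun a b => d.idxOf a < d.idxOf b) := by
  induction d with
  | nil => simp [PySem.Set.ofList_nil]
  | cons x xs ih =>
    rw [PySem.Set.ofList_cons]
    have hsub : List.Sublist (PySem.Set.discard (PySem.Set.ofList xs) x) (PySem.Set.ofList xs) := by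
      simpa [PySem.Set.discard] using List.filter_sublist (l := PySem.Set.ofList xs)
    constructor
    · intro b hb
      have hbx : b ≠ x := ((PySem.Set.mem_discard _ _ _).mp hb).2
      rw [List.idxOf_cons_self, List.idxOf_cons_ne _ (fun he => hbx he.symm)]
      exact Nat.succ_pos _
    · refine (ih.sublist hsub).imp_of_mem ?_
      intro a b ha hb hlt
      have hax : a ≠ x := ((PySem.Set.mem_discard _ _ _).mp ha).2
      have hbx : b ≠ x := ((PySem.Set.mem_discard _ _ _).mp hb).2
      rw [List.idxOf_cons_ne _ (fun he => hax he.symm), List.idxOf_cons_ne _ (fun he => hbx he.symm)]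
      exact Nat.succ_lt_succ hlt

def pvBlocks (d : List Int) : List (List Int) :=
  (PySem.Set.ofList d).map (fun lab => get_indices d lab)

theorem pv_blocks_pairwise (d : List Int) : (pvBlocks d).Pairwise (· < ·) := by
  unfold pvBlocks
  rw [List.pairwise_map]
  refine (pv_ofList_pairwise d).imp_of_mem ?_
  intro a b ha hb hlt
  have ha' : a ∈ d := (PySem.Set.mem_ofList _ _).mp ha
  have hb' : b ∈ d := (PySem.Set.mem_ofList _ _).mp hb
  obtain ⟨ta, hta⟩ : ∃ t, get_indices d a = ((d.idxOf a : Nat) : Int) :: t := by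
    rcases hx : get_indices d a with _ | ⟨h0, t⟩
    · exact absurd (pv_gi_head d a ha') (by simp [hx])
    · have := pv_gi_head d a ha'
      rw [hx] at this
      simp at this
      exact ⟨t, by rw [this]⟩
  obtain ⟨tb, htb⟩ : ∃ t, get_indices d b = ((d.idxOf b : Nat) : Int) :: t := by
    rcases hx : get_indices d b with _ | ⟨h0, t⟩
    · exact absurd (pv_gi_head d b hb') (by simp [hx])
    · have := pv_gi_head d b hb'
      rw [hx] at this
      simp at this
      exact ⟨t, by rw [this]⟩
  rw [hta, htb]
  exact List.Lex.rel (by exact_mod_cast hlt)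

theorem pv_canon_eq_blocks (d : List Int) : compute_canonical_form d = pvBlocks d := by
  unfold compute_canonical_form
  rw [PySem.List.foldl_append_singleton_eq_map, List.nil_append]
  have hmap : (PySem.Set.ofList d).map (fun lab => PySem.List.sorted (get_indices d lab) (fun x => x))
      = pvBlocks d := by
    unfold pvBlocks
    refine List.map_congr_left ?_
    intro lab _
    exact PySem.List.sorted_eq_self_of_pairwise _ _ ((pv_gi_pairwise d lab).imp le_of_lt)
  rw [hmap]
  refine Eq.trans ?_ (PySem.List.sorted_eq_of_perm_of_pairwise_lt _ _ (fun x => x) (List.Perm.refl _) (pv_blocks_pairwise d))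
  congr 1

def pvCode (d : List Int) (lab : Int) : Int := ((PySem.Set.ofList d).idxOf lab : Nat)

theorem pv_code_inj (d : List Int) {a b : Int} (ha : a ∈ d) (hb : b ∈ d)
    (h : pvCode d a = pvCode d b) : a = b := by
  have ha' : a ∈ PySem.Set.ofList d := (PySem.Set.mem_ofList _ _).mpr ha
  have hb' : b ∈ PySem.Set.ofList d := (PySem.Set.mem_ofList _ _).mpr hb
  have h' : (PySem.Set.ofList d).idxOf a = (PySem.Set.ofList d).idxOf b := by
    unfold pvCode at h; exact_mod_cast h
  have hlt : (PySem.Set.ofList d).idxOf a < (PySem.Set.ofList d).length :=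
    List.idxOf_lt_length_of_mem ha'
  calc a = (PySem.Set.ofList d)[(PySem.Set.ofList d).idxOf a] := (List.getElem_idxOf hlt).symm
    _ = (PySem.Set.ofList d)[(PySem.Set.ofList d).idxOf b] := by congr 1
    _ = b := List.getElem_idxOf (List.idxOf_lt_length_of_mem hb')

def pvDict (p : List Int) : PySem.Dict Int Int :=
  PySem.Dict.mk ((PySem.Set.ofList p).zipIdx.map (fun q => (q.1, (q.2 : Int))))

theorem pvDict_keys (p : List Int) : (pvDict p).keys = PySem.Set.ofList p := by
  have h2 := List.zipIdx_map_fst 0 (PySem.Set.ofList p)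
  simp only [pvDict, PySem.Dict.keys, List.map_map]
  convert h2 using 1

theorem pvDict_contains (p : List Int) (x : Int) :
    (pvDict p).contains x = decide (x ∈ p) := by
  by_cases h : x ∈ p
  · simp [h]
    exact (PySem.Dict.contains_iff_mem_keys _ _).mpr (by rw [pvDict_keys]; exact (PySem.Set.mem_ofList _ _).mpr h)
  · simp only [h, decide_false]
    by_contra hc
    have hc' : (pvDict p).contains x = true := by
      cases hcc : (pvDict p).contains x
      · exact absurd hcc hc
      · rfl
    exact h ((PySem.Set.mem_ofList _ _).mp (by rw [← pvDict_keys p]; exact (PySem.Dict.contains_iff_mem_keys _ _).mp hc'))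

theorem pvDict_getD (p : List Int) (x : Int) (h : x ∈ p) :
    (pvDict p).getD x 0 = pvCode p x := by
  have hx : x ∈ PySem.Set.ofList p := (PySem.Set.mem_ofList _ _).mpr h
  have hlt : (PySem.Set.ofList p).idxOf x < (PySem.Set.ofList p).length := List.idxOf_lt_length_of_mem hx
  have hmem : (x, ((PySem.Set.ofList p).idxOf x : Int)) ∈ (pvDict p).items := by
    unfold pvDict
    refine List.mem_map.mpr ⟨((PySem.Set.ofList p)[(PySem.Set.ofList p).idxOf x], (PySem.Set.ofList p).idxOf x), ?_, ?_⟩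
    · exact List.mem_zipIdx_iff_getElem?.mpr (by simp [List.getElem?_eq_getElem hlt])
    · simp [List.getElem_idxOf hlt]
  have hnd : (pvDict p).keys.Nodup := by rw [pvDict_keys]; exact PySem.Set.nodup_ofList p
  exact PySem.Dict.getD_of_mem_items _ hmem hnd 0

theorem pvDict_stable (p : List Int) (x : Int) (h : x ∈ p) : pvDict (p ++ [x]) = pvDict p := by
  unfold pvDict
  rw [PySem.Set.ofList_append_singleton, PySem.Set.add_of_mem ((PySem.Set.mem_ofList _ _).mpr h)]

theorem pvDict_insert (p : List Int) (x : Int) (h : x ∉ p) :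
    (pvDict p).insert x (((pvDict p).size : Nat) : Int) = pvDict (p ++ [x]) := by
  have hx : x ∉ PySem.Set.ofList p := fun hc => h ((PySem.Set.mem_ofList _ _).mp hc)
  apply PySem.Dict.ext
  rw [PySem.Dict.items_insert_of_not_contains _ _ (by rw [pvDict_contains]; simpa using h)]
  show (pvDict p).items ++ _ = (pvDict (p ++ [x])).items
  unfold pvDict
  rw [PySem.Set.ofList_append_singleton, PySem.Set.add_of_not_mem hx, List.zipIdx_append, List.map_append]
  congr 1
  simp [pvDict, PySem.Dict.size]

theorem pv_code_prefix (p r : List Int) (lab : Int) (h : lab ∈ p) :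
    pvCode (p ++ r) lab = pvCode p lab := by
  have hx : lab ∈ PySem.Set.ofList p := (PySem.Set.mem_ofList _ _).mpr h
  unfold pvCode
  rw [PySem.Set.ofList_append, PySem.Set.update_eq_append_filter, List.idxOf_append, if_pos hx]

theorem pv_relabel_aux (rest : List Int) : ∀ (p acc : List Int),
    rest.foldl
      (fun (st : PySem.Dict Int Int × List Int) lab =>
        let codes := if st.1.contains lab then st.1 else st.1.insert lab ((st.1.size : Int))
        (codes, st.2 ++ [codes.getD lab 0]))
      (pvDict p, acc)
    = (pvDict (p ++ rest), acc ++ rest.map (fun lab => pvCode (p ++ rest) lab)) := by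
  induction rest with
  | nil => intro p acc; simp
  | cons x rest ih =>
    intro p acc
    have hsplit : p ++ x :: rest = (p ++ [x]) ++ rest := by simp
    rw [List.foldl_cons]
    by_cases hx : x ∈ p
    · have hc : (pvDict p).contains x = true := by rw [pvDict_contains]; simpa using hx
      have hval : (pvDict p).getD x 0 = pvCode (p ++ x :: rest) x := by
        rw [pvDict_getD p x hx]
        exact (pv_code_prefix p (x :: rest) x hx).symm
      simp only [hc, if_true]
      rw [show ((pvDict p, acc ++ [(pvDict p).getD x 0]) : PySem.Dict Int Int × List Int)
            = (pvDict (p ++ [x]), acc ++ [(pvDict p).getD x 0]) by rw [pvDict_stable p x hx],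
          ih (p ++ [x]) _, ← hsplit]
      simp [hval]
    · have hc : (pvDict p).contains x = false := by rw [pvDict_contains]; simpa using hx
      have hval : (pvDict (p ++ [x])).getD x 0 = pvCode (p ++ x :: rest) x := by
        rw [pvDict_getD (p ++ [x]) x (by simp), hsplit, pv_code_prefix (p ++ [x]) rest x (by simp)]
      simp only [hc, Bool.false_eq_true, if_false]
      rw [pvDict_insert p x hx, ih (p ++ [x]) _, ← hsplit]
      simp [hval]
theorem pv_relabel_eq_map (d : List Int) : relabel_key d = d.map (fun lab => pvCode d lab) := by
  unfold relabel_key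
  have h0 : (PySem.Dict.empty : PySem.Dict Int Int) = pvDict [] := rfl
  rw [h0, pv_relabel_aux d [] []]
  simp

theorem pv_flatten_len (d : List Int) : (pvBlocks d).flatten.length = d.length := by
  rw [List.length_flatten]
  unfold pvBlocks
  rw [List.map_map]
  have h1 : (List.map (List.length ∘ fun lab => get_indices d lab) (PySem.Set.ofList d))
      = (PySem.Set.ofList d).map (fun lab => d.count lab) := by
    refine List.map_congr_left ?_
    intro lab _
    exact pv_gi_len d lab
  rw [h1]
  have hperm : (PySem.Set.ofList d).Perm d.dedup := by
    rw [List.perm_ext_iff_of_nodup (PySem.Set.nodup_ofList d) (List.nodup_dedup d)]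
    intro a
    rw [PySem.Set.mem_ofList, List.mem_dedup]
  rw [(hperm.map (fun lab => d.count lab)).sum_eq]
  have := List.sum_map_count_dedup_eq_length d
  simpa using this

def pvU (c : List (List Int)) : List Int :=
  (List.range c.flatten.length).map (fun (k : Nat) => ((c.findIdx (fun b => decide (((k : Nat) : Int) ∈ b))) : Int))

theorem pv_U_blocks (d : List Int) : pvU (pvBlocks d) = d.map (fun lab => pvCode d lab) := by
  have hlen : (pvBlocks d).flatten.length = d.length := pv_flatten_len d
  unfold pvU
  apply List.ext_getElem
  · simpa using hlen
  · intro k hk1 hk2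
    have hkd : k < d.length := by
      have : k < (List.range (pvBlocks d).flatten.length).length := by simpa using hk1
      simpa [hlen] using this
    simp only [List.getElem_map, List.getElem_range]
    conv_lhs => rw [show pvBlocks d = (PySem.Set.ofList d).map (fun lab => get_indices d lab) from rfl, List.findIdx_map]
    have hcong : (PySem.Set.ofList d).findIdx ((fun b => decide (((k : Nat) : Int) ∈ b)) ∘ fun lab => get_indices d lab)
        = (PySem.Set.ofList d).findIdx (fun lab => lab == d[k]) := by
      apply pv_findIdx_congr
      intro lab _
      simp only [Function.comp]
      have hiff : (((k : Nat) : Int) ∈ get_indices d lab) ↔ (lab = d[k]) := by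
        rw [pv_mem_gi]
        constructor
        · rintro ⟨k', hk', hek, hd⟩
          have : k = k' := by exact_mod_cast hek
          subst this; exact hd.symm
        · intro hd; exact ⟨k, hkd, rfl, hd.symm⟩
      rw [decide_eq_decide.mpr hiff]
      rfl
    rw [hcong]
    rfl

theorem pv_enumerate_map (f : Int → Int) (l : List Int) : ∀ (s : Int),
    PySem.List.enumerate (l.map f) s = (PySem.List.enumerate l s).map (fun p => (p.1, f p.2)) := by
  induction l with
  | nil => intro s; simp [PySem.List.enumerate_nil]
  | cons x xs ih =>
    intro s
    rw [List.map_cons, PySem.List.enumerate_cons, PySem.List.enumerate_cons, List.map_cons, ih (s + 1)]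

theorem pv_gi_map (d : List Int) (f : Int → Int)
    (hinj : ∀ a ∈ d, ∀ b ∈ d, f a = f b → a = b) (lab : Int) (hlab : lab ∈ d) :
    get_indices (d.map f) (f lab) = get_indices d lab := by
  unfold get_indices
  rw [pv_enumerate_map f d 0, List.filter_map]
  rw [List.map_map]
  have hfil : List.filter ((fun p => p.2 == f lab) ∘ fun p : Int × Int => (p.1, f p.2)) (PySem.List.enumerate d 0)
      = List.filter (fun p => p.2 == lab) (PySem.List.enumerate d 0) := by
    apply List.filter_congr
    intro p hp
    have hmem : p.2 ∈ d := by
      rcases (PySem.List.mem_enumerate_iff _ _ _).mp hp with ⟨k, hk, rfl⟩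
      exact List.getElem_mem _
    simp only [Function.comp]
    by_cases he : p.2 = lab
    · simp [he]
    · have : ¬ f p.2 = f lab := fun hc => he (hinj _ hmem _ hlab hc)
      simp [he, this]
  rw [hfil]
  rfl

theorem pv_ofList_map (l : List Int) (f : Int → Int)
    (hinj : ∀ a ∈ l, ∀ b ∈ l, f a = f b → a = b) :
    PySem.Set.ofList (l.map f) = (PySem.Set.ofList l).map f := by
  induction l using List.reverseRecOn with
  | nil => simp [PySem.Set.ofList_nil]
  | append_singleton xs x ih =>
    have hinj' : ∀ a ∈ xs, ∀ b ∈ xs, f a = f b → a = b := by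
      intro a ha b hb
      exact hinj a (List.mem_append_left _ ha) b (List.mem_append_left _ hb)
    rw [List.map_append, List.map_singleton, PySem.Set.ofList_append_singleton,
        PySem.Set.ofList_append_singleton, ih hinj']
    by_cases hx : x ∈ PySem.Set.ofList xs
    · rw [PySem.Set.add_of_mem hx, PySem.Set.add_of_mem]
      exact List.mem_map_of_mem hx
    · rw [PySem.Set.add_of_not_mem hx, PySem.Set.add_of_not_mem, List.map_append, List.map_singleton]
      intro hc
      rcases List.mem_map.mp hc with ⟨a, ha, hfa⟩
      have ha' : a ∈ xs := (PySem.Set.mem_ofList _ _).mp ha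
      have : a = x := hinj a (List.mem_append_left _ ha') x (List.mem_append_right _ (List.mem_singleton_self x)) hfa
      exact hx (this ▸ ha)

theorem pv_blocks_relabel (d : List Int) : pvBlocks (relabel_key d) = pvBlocks d := by
  rw [pv_relabel_eq_map]
  have hinj : ∀ a ∈ d, ∀ b ∈ d, pvCode d a = pvCode d b → a = b := fun a ha b hb h => pv_code_inj d ha hb h
  unfold pvBlocks
  rw [pv_ofList_map d _ hinj, List.map_map]
  refine List.map_congr_left ?_
  intro lab hlab
  have hlab' : lab ∈ d := (PySem.Set.mem_ofList _ _).mp hlab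
  exact pv_gi_map d _ hinj lab hlab'

theorem pv_key_iff' (d e : List Int) :
    compute_canonical_form d = compute_canonical_form e ↔ relabel_key d = relabel_key e := by
  constructor
  · intro h
    rw [pv_relabel_eq_map, ← pv_U_blocks, pv_relabel_eq_map e, ← pv_U_blocks e,
        ← pv_canon_eq_blocks, ← pv_canon_eq_blocks, h]
  · intro h
    rw [pv_canon_eq_blocks, ← pv_blocks_relabel, pv_canon_eq_blocks e, ← pv_blocks_relabel e, h]

theorem pv_loop (l : List (List Int × List Int)) :
    ∀ (acc : List (List Int × List Int)) (sA : PySem.Set (List (List Int))) (sB : PySem.Set (List Int)),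
    (∀ x : List Int, compute_canonical_form x ∈ sA ↔ relabel_key x ∈ sB) →
    (l.foldl
      (fun (st : List (List Int × List Int) × PySem.Set (List (List Int))) r =>
        let canonical := compute_canonical_form r.1
        if PySem.Set.contains st.2 canonical then st
        else (st.1 ++ [(r.1, r.2)], PySem.Set.add st.2 canonical))
      (acc, sA)).1
    = (l.foldl
      (fun (st : List (List Int × List Int) × PySem.Set (List Int)) r =>
        let key := relabel_key r.1
        if PySem.Set.contains st.2 key then st
        else (st.1 ++ [(r.1, r.2)], PySem.Set.add st.2 key))
      (acc, sB)).1 := by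
  induction l with
  | nil => intro acc sA sB _; rfl
  | cons r l ih =>
    intro acc sA sB hInv
    rw [List.foldl_cons, List.foldl_cons]
    by_cases hmem : compute_canonical_form r.1 ∈ sA
    · have hmB : relabel_key r.1 ∈ sB := (hInv r.1).mp hmem
      have hA : PySem.Set.contains sA (compute_canonical_form r.1) = true := (PySem.Set.contains_iff _ _).mpr hmem
      have hB : PySem.Set.contains sB (relabel_key r.1) = true := (PySem.Set.contains_iff _ _).mpr hmB
      simp only [hA, hB, if_true]
      exact ih acc sA sB hInv
    · have hmB : relabel_key r.1 ∉ sB := fun hc => hmem ((hInv r.1).mpr hc)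
      have hA : PySem.Set.contains sA (compute_canonical_form r.1) = false := by
        cases hcc : PySem.Set.contains sA (compute_canonical_form r.1)
        · rfl
        · exact absurd ((PySem.Set.contains_iff _ _).mp hcc) hmem
      have hB : PySem.Set.contains sB (relabel_key r.1) = false := by
        cases hcc : PySem.Set.contains sB (relabel_key r.1)
        · rfl
        · exact absurd ((PySem.Set.contains_iff _ _).mp hcc) hmB
      simp only [hA, hB, Bool.false_eq_true, if_false]
      refine ih _ _ _ ?_
      intro x
      rw [PySem.Set.mem_add, PySem.Set.mem_add]
      constructor
      · rintro (hx | hx)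
        · exact Or.inl ((hInv x).mp hx)
        · exact Or.inr ((pv_key_iff' x r.1).mp hx)
      · rintro (hx | hx)
        · exact Or.inl ((hInv x).mpr hx)
        · exact Or.inr ((pv_key_iff' x r.1).mpr hx)

-- ===== VERDICT (by name: the statement is the Claim_ definition above) =====
theorem filter_results_with_chords_spec : Claim_equal_filter_results_with_chords := by
  intro rs _
  unfold Spec_filter_results_with_chords filter_results_with_chords filter_results_with_chords_alt
  by_cases h : rs = []
  · subst h; simp
  · rw [if_neg h]
    exact pv_loop rs [] PySem.Set.empty PySem.Set.empty (by intro x; simp [PySem.Set.empty])
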